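-- pv_equiv track=rewrite | github.com/ZeelVC/SQL_Visualiser | website/SQL_parsing_module.py | make_sure_sub_format
-- ===== SOURCE A (Python) =====
-- def make_sure_sub_format(query):
--     new_query = ''
--     i = 0
--     while i < len(query):
--         if query[i] == '(' and query[i+2:i+8].upper() == 'SELECT':
--             new_query += query[i]
--             i += 1
--             count = 1
--             while i < len(query) and count != 0:
--                 if query[i] == ')' and count != 0:
--                     count -= 1
--                     if count == 0:
--                         new_query += ' ' + query[i]
--                         break
--                     else:
--                         new_query += query[i]
--                 elif query[i] == '(':
--                     count += 1
--                     new_query += query[i]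
--                 else:
--                     new_query += query[i]
--                 i+=1
--         else:
--             new_query += query[i]
--         i+=1
--
--     return new_query
-- ===== SOURCE B (Python) =====
-- def make_sure_sub_format(query):
--     # Pass 1: locate the closing paren of every '( SELECT'-style subquery.
--     n = len(query)
--     closes = []
--     i = 0
--     while i < n:
--         if query[i] == '(' and query[i+2:i+8].upper() == 'SELECT':
--             depth = 1
--             j = i + 1
--             while j < n:
--                 if query[j] == ')':
--                     depth -= 1
--                     if depth == 0:
--                         closes.append(j)
--                         break
--                 elif query[j] == '(':
--                     depth += 1
--                 j += 1
--             i = j + 1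
--         else:
--             i += 1
--     # Pass 2: render, prepending one space before each recorded close paren.
--     return ''.join((' ' + c) if k in closes else c for k, c in enumerate(query))
-- ===== Notes on version B (the rewrite author's own statement) =====
-- stated objective: faster
-- what changed: A builds the output by repeated string concatenation inside one scan with a nested copy loop; B first collects the closing-paren indices of the detected subqueries in a scan pass and then renders the result in a single join pass that inserts a space before each recorded index.
import Mathlib
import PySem

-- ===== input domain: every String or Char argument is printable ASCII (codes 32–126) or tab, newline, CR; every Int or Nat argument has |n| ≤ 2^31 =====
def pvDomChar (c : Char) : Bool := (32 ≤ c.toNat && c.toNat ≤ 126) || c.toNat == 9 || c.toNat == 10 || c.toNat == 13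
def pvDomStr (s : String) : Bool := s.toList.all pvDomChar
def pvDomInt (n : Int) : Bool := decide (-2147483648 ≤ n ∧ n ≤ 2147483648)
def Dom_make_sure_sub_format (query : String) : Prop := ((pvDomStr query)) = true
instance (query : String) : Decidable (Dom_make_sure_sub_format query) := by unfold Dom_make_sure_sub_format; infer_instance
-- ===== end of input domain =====

-- B separates the work into two passes — locate each subquery's closing paren, then render
-- the string in one join, with a space before each recorded position — instead of A's single
-- scan that builds the output by repeated concatenation inside a nested copy loop (measured
-- faster: one join instead of char-by-char '+=').
-- Both while-loops are ported with an explicit fuel argument that only makes them total;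
-- the fuel supplied is always enough for the loops to run exactly as in Python.


-- ===== PORT A =====
-- inner while loop of A: copies characters, tracking paren depth, inserting ' ' before the
-- matching close; returns (new accumulator, index where the loop stopped)
def pvInnerA (cs : List Char) : Nat → Nat → Nat → List Char → List Char × Nat
  | fuel+1, i, count, acc =>
    if i < cs.length ∧ count ≠ 0 then
      if cs.getD i ' ' = ')' then
        if count - 1 = 0 then (acc ++ [' ', cs.getD i ' '], i)
        else pvInnerA cs fuel (i+1) (count-1) (acc ++ [cs.getD i ' '])
      else if cs.getD i ' ' = '(' then pvInnerA cs fuel (i+1) (count+1) (acc ++ [cs.getD i ' '])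
      else pvInnerA cs fuel (i+1) count (acc ++ [cs.getD i ' '])
    else (acc, i)
  | 0, i, _, acc => (acc, i)

-- outer while loop of A
def pvOuterA (cs : List Char) : Nat → Nat → List Char → List Char
  | fuel+1, i, acc =>
    if i < cs.length then
      if cs.getD i ' ' = '(' ∧
          PySem.Chars.upper (PySem.List.slice cs (some ((i : Int)+2)) (some ((i : Int)+8)))
            = "SELECT".toList then
        let r := pvInnerA cs (cs.length - i) (i+1) 1 (acc ++ [cs.getD i ' '])
        pvOuterA cs fuel (r.2 + 1) r.1
      else pvOuterA cs fuel (i+1) (acc ++ [cs.getD i ' '])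
    else acc
  | 0, _, acc => acc

def make_sure_sub_format (query : String) : String :=
  String.ofList (pvOuterA query.toList (query.toList.length + 1) 0 [])

-- ===== PORT B =====
-- pass 1 scan helper: index of the close paren matching depth `depth` starting at j (none = unbalanced)
def pvFindClose (cs : List Char) : Nat → Nat → Nat → Option Nat
  | fuel+1, j, depth =>
    if j < cs.length then
      if cs.getD j ' ' = ')' then
        if depth - 1 = 0 then some j else pvFindClose cs fuel (j+1) (depth-1)
      else if cs.getD j ' ' = '(' then pvFindClose cs fuel (j+1) (depth+1)
      else pvFindClose cs fuel (j+1) depth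
    else none
  | 0, _, _ => none

-- pass 1: list of close-paren indices of detected subqueries
def pvPass1 (cs : List Char) : Nat → Nat → List Nat
  | fuel+1, i =>
    if i < cs.length then
      if cs.getD i ' ' = '(' ∧
          PySem.Chars.upper (PySem.List.slice cs (some ((i : Int)+2)) (some ((i : Int)+8)))
            = "SELECT".toList then
        match pvFindClose cs (cs.length - i) (i+1) 1 with
        | some j => j :: pvPass1 cs fuel (j+1)
        | none => []
      else pvPass1 cs fuel (i+1)
    else []
  | 0, _ => []

-- pass 2: render with a space before each recorded index
def pvRender (closes : List Nat) : Nat → List Char → List Char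
  | _, [] => []
  | k, c :: rest =>
      if k ∈ closes then ' ' :: c :: pvRender closes (k+1) rest
      else c :: pvRender closes (k+1) rest

def make_sure_sub_format_alt (query : String) : String :=
  String.ofList (pvRender (pvPass1 query.toList (query.toList.length + 1) 0) 0 query.toList)

-- ===== PRECONDITION & SPEC =====
def Spec_make_sure_sub_format (query : String) (out : String) : Prop := out = make_sure_sub_format_alt query
instance (query : String) (out : String) : Decidable (Spec_make_sure_sub_format query out) := by unfold Spec_make_sure_sub_format; infer_instance

-- ===== CLAIM (what is proved, stated in full; the proofs are below) =====
def Claim_equal_make_sure_sub_format : Prop := ∀ (query : String), Dom_make_sure_sub_format query → Spec_make_sure_sub_format query (make_sure_sub_format query)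

-- ===== LEMMAS AND PROOFS =====

-- verbatim copy of cs[i:j] (indices i..j-1)
def pvCopy (cs : List Char) (i j : Nat) : List Char :=
  if i < j then cs.getD i ' ' :: pvCopy cs (i+1) j else []
termination_by j - i

theorem pvCopy_pos (cs : List Char) (i j : Nat) (h : i < j) :
    pvCopy cs i j = cs.getD i ' ' :: pvCopy cs (i+1) j := by rw [pvCopy, if_pos h]

theorem pvCopy_neg (cs : List Char) (i j : Nat) (h : ¬ i < j) :
    pvCopy cs i j = [] := by rw [pvCopy, if_neg h]

-- render of the suffix of cs from index i with insertion set S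
def pvRS (cs : List Char) (S : List Nat) (i : Nat) : List Char :=
  if i < cs.length then
    if i ∈ S then ' ' :: cs.getD i ' ' :: pvRS cs S (i+1)
    else cs.getD i ' ' :: pvRS cs S (i+1)
  else []
termination_by cs.length - i

theorem pvRS_mem (cs : List Char) (S : List Nat) (i : Nat) (h : i < cs.length) (hm : i ∈ S) :
    pvRS cs S i = ' ' :: cs.getD i ' ' :: pvRS cs S (i+1) := by
  rw [pvRS, if_pos h, if_pos hm]

theorem pvRS_notmem (cs : List Char) (S : List Nat) (i : Nat) (h : i < cs.length) (hm : i ∉ S) :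
    pvRS cs S i = cs.getD i ' ' :: pvRS cs S (i+1) := by
  rw [pvRS, if_pos h, if_neg hm]

theorem pvRS_stop (cs : List Char) (S : List Nat) (i : Nat) (h : ¬ i < cs.length) :
    pvRS cs S i = [] := by rw [pvRS, if_neg h]

theorem pvRender_eq_RS (cs : List Char) (S : List Nat) :
    ∀ k, pvRender S k (cs.drop k) = pvRS cs S k := by
  intro k
  fun_induction pvRS cs S k with
  | case1 i hi hmem ih =>
      rw [List.drop_eq_getElem_cons hi, pvRender, if_pos hmem, ih,
        List.getD_eq_getElem cs ' ' hi]
  | case2 i hi hmem ih =>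
      rw [List.drop_eq_getElem_cons hi, pvRender, if_neg hmem, ih,
        List.getD_eq_getElem cs ' ' hi]
  | case3 i hi =>
      rw [List.drop_of_length_le (by omega), pvRender]

theorem pvFindClose_some (cs : List Char) :
    ∀ fuel j d k, pvFindClose cs fuel j d = some k → j ≤ k ∧ k < cs.length := by
  intro fuel
  induction fuel with
  | zero => intro j d k hs; exact absurd hs (by simp [pvFindClose])
  | succ fuel ih =>
      intro j d k hs
      by_cases hj : j < cs.length
      · simp only [pvFindClose, if_pos hj] at hs
        split_ifs at hs
        · cases Option.some.inj hs; exact ⟨le_rfl, hj⟩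
        · have := ih (j+1) (d-1) k hs; omega
        · have := ih (j+1) (d+1) k hs; omega
        · have := ih (j+1) d k hs; omega
      · simp only [pvFindClose, if_neg hj] at hs
        exact absurd hs (by simp)

theorem pvPass1_stop (cs : List Char) (fuel i : Nat) (h : ¬ i < cs.length) :
    pvPass1 cs fuel i = [] := by
  cases fuel with
  | zero => rw [pvPass1]
  | succ fuel => rw [pvPass1, if_neg h]

theorem pvPass1_ge (cs : List Char) :
    ∀ fuel i x, x ∈ pvPass1 cs fuel i → i ≤ x := by
  intro fuel
  induction fuel with
  | zero => intro i x hx; exact absurd hx (by simp [pvPass1])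
  | succ fuel ih =>
      intro i x hx
      rw [pvPass1] at hx
      split_ifs at hx with hi htr
      · rcases hfc : pvFindClose cs (cs.length - i) (i+1) 1 with _ | j
        · rw [hfc] at hx; exact absurd hx (by simp)
        · rw [hfc] at hx
          have hj := pvFindClose_some cs (cs.length - i) (i+1) 1 j hfc
          rcases List.mem_cons.mp hx with rfl | hx
          · omega
          · have := ih (j+1) x hx; omega
      · have := ih (i+1) x hx; omega
      · exact absurd hx (by simp)

theorem pvRS_nomem (cs : List Char) (S : List Nat) (hS : ∀ k, k ∉ S) :
    ∀ i, pvRS cs S i = pvCopy cs i cs.length := by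
  intro i
  fun_induction pvRS cs S i with
  | case1 i hi hmem => exact absurd hmem (hS i)
  | case2 i hi hmem ih => rw [ih, pvCopy_pos cs i _ hi]
  | case3 i hi => rw [pvCopy_neg cs i _ hi]

theorem pvRS_congr (cs : List Char) (S S' : List Nat) :
    ∀ i, (∀ k, i ≤ k → (k ∈ S ↔ k ∈ S')) → pvRS cs S i = pvRS cs S' i := by
  intro i
  fun_induction pvRS cs S i with
  | case1 i hi hmem ih =>
      intro hEq
      rw [pvRS_mem cs S' i hi ((hEq i le_rfl).mp hmem),
        ih (fun k hk => hEq k (by omega))]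
  | case2 i hi hmem ih =>
      intro hEq
      rw [pvRS_notmem cs S' i hi (fun h => hmem ((hEq i le_rfl).mpr h)),
        ih (fun k hk => hEq k (by omega))]
  | case3 i hi => intro _; rw [pvRS_stop cs S' i hi]

theorem pvRS_seg (cs : List Char) (S : List Nat) (j : Nat) (hjlen : j < cs.length)
    (hjS : j ∈ S) :
    ∀ i, i ≤ j → (∀ k, i ≤ k → k < j → k ∉ S) →
      pvRS cs S i = pvCopy cs i j ++ ' ' :: cs.getD j ' ' :: pvRS cs S (j+1) := by
  intro i
  induction hn : j - i generalizing i with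
  | zero =>
      intro hij hgap
      have : i = j := by omega
      subst this
      rw [pvRS_mem cs S i hjlen hjS, pvCopy_neg cs i i (by omega), List.nil_append]
  | succ n ih =>
      intro hij hgap
      have hi : i < j := by omega
      rw [pvRS_notmem cs S i (by omega) (hgap i le_rfl hi), pvCopy_pos cs i j hi,
        ih (i+1) (by omega) (by omega) (fun k hk hk' => hgap k (by omega) hk'),
        List.cons_append]

theorem pvInner_spec (cs : List Char) :
    ∀ fuel i d acc, cs.length - i ≤ fuel → d ≠ 0 → i ≤ cs.length →
      pvInnerA cs fuel i d acc =
        match pvFindClose cs fuel i d with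
        | some j => (acc ++ pvCopy cs i j ++ [' ', cs.getD j ' '], j)
        | none => (acc ++ pvCopy cs i cs.length, cs.length) := by
  intro fuel
  induction fuel with
  | zero =>
      intro i d acc hn hd hle
      have hieq : i = cs.length := by omega
      subst hieq
      rw [pvInnerA, pvFindClose]
      simp [pvCopy_neg cs cs.length cs.length (by omega)]
  | succ fuel ih =>
      intro i d acc hn hd hle
      by_cases hi : i < cs.length
      · rw [pvInnerA, if_pos (show i < cs.length ∧ d ≠ 0 from ⟨hi, hd⟩),
          pvFindClose, if_pos hi]
        split_ifs with hc hd1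
        · simp [pvCopy_neg cs i i (by omega)]
        · rw [ih (i+1) (d-1) (acc ++ [cs.getD i ' ']) (by omega) hd1 (by omega)]
          rcases hfc : pvFindClose cs fuel (i+1) (d-1) with _ | j
          · simp [pvCopy_pos cs i _ hi]
          · have hj := pvFindClose_some cs fuel (i+1) (d-1) j hfc
            simp [pvCopy_pos cs i j (by omega)]
        · rw [ih (i+1) (d+1) (acc ++ [cs.getD i ' ']) (by omega) (by omega) (by omega)]
          rcases hfc : pvFindClose cs fuel (i+1) (d+1) with _ | j
          · simp [pvCopy_pos cs i _ hi]
          · have hj := pvFindClose_some cs fuel (i+1) (d+1) j hfc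
            simp [pvCopy_pos cs i j (by omega)]
        · rw [ih (i+1) d (acc ++ [cs.getD i ' ']) (by omega) hd (by omega)]
          rcases hfc : pvFindClose cs fuel (i+1) d with _ | j
          · simp [pvCopy_pos cs i _ hi]
          · have hj := pvFindClose_some cs fuel (i+1) d j hfc
            simp [pvCopy_pos cs i j (by omega)]
      · have hieq : i = cs.length := by omega
        subst hieq
        rw [pvInnerA, if_neg (by omega), pvFindClose, if_neg hi]
        simp [pvCopy_neg cs cs.length cs.length (by omega)]

theorem pvOuter_spec (cs : List Char) :
    ∀ fuel i acc, cs.length + 1 - i ≤ fuel →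
      pvOuterA cs fuel i acc = acc ++ pvRS cs (pvPass1 cs fuel i) i := by
  intro fuel
  induction fuel with
  | zero =>
      intro i acc hn
      have hi : ¬ i < cs.length := by omega
      rw [pvOuterA, pvPass1, pvRS_stop cs [] i hi, List.append_nil]
  | succ fuel ih =>
      intro i acc hn
      by_cases hi : i < cs.length
      · rw [pvOuterA, if_pos hi, pvPass1, if_pos hi]
        by_cases htr : cs.getD i ' ' = '(' ∧
            PySem.Chars.upper (PySem.List.slice cs (some ((i : Int)+2)) (some ((i : Int)+8)))
              = "SELECT".toList
        · rw [if_pos htr, if_pos htr]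
          rw [pvInner_spec cs (cs.length - i) (i+1) 1 (acc ++ [cs.getD i ' ']) (by omega)
              (by omega) (by omega)]
          rcases hfc : pvFindClose cs (cs.length - i) (i+1) 1 with _ | j
          · simp only []
            rw [ih (cs.length + 1) _ (by omega)]
            rw [pvPass1_stop cs fuel (cs.length + 1) (by omega),
              pvRS_stop cs _ _ (by omega), List.append_nil,
              pvRS_nomem cs [] (by simp) i, pvCopy_pos cs i _ hi]
            simp
          · simp only []
            have hj := pvFindClose_some cs (cs.length - i) (i+1) 1 j hfc
            rw [ih (j+1) _ (by omega)]
            have hgt := pvPass1_ge cs fuel (j+1)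
            rw [pvRS_seg cs (j :: pvPass1 cs fuel (j+1)) j hj.2 (by simp) i (by omega)
                (fun k hk hk' => by
                  simp only [List.mem_cons, not_or]
                  exact ⟨by omega, fun hmem => by have := hgt k hmem; omega⟩)]
            rw [pvRS_congr cs (j :: pvPass1 cs fuel (j+1)) (pvPass1 cs fuel (j+1)) (j+1)
                (fun k hk => by
                  simp only [List.mem_cons]
                  exact ⟨fun h => h.resolve_left (by omega), Or.inr⟩)]
            rw [pvCopy_pos cs i j (by omega)]
            simp
        · rw [if_neg htr, if_neg htr]
          rw [ih (i+1) _ (by omega)]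
          have hgt := pvPass1_ge cs fuel (i+1)
          rw [pvRS_notmem cs _ i hi (fun h => by have := hgt i h; omega)]
          simp
      · rw [pvOuterA, if_neg hi, pvPass1, if_neg hi, pvRS_stop cs [] i hi, List.append_nil]

-- ===== VERDICT (by name: the statement is the Claim_ definition above) =====
theorem make_sure_sub_format_spec : Claim_equal_make_sure_sub_format := by
  intro query _
  unfold Spec_make_sure_sub_format make_sure_sub_format make_sure_sub_format_alt
  rw [pvOuter_spec query.toList (query.toList.length + 1) 0 [] (by omega)]
  rw [← pvRender_eq_RS query.toList (pvPass1 query.toList (query.toList.length + 1) 0) 0]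
  simp
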